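/- GENERATED by tools/from_farm_form.py from prooffarm-gif/accepted/gif_decode.3/Proof.lean (a worked proof of the farm's unit `gif_decode.3`,
   accepted by the verdict) — do not edit. -/
import Gif.Spec.Units.gif_decode_3
import Gif.Spec.AllSegs
import Gif.Spec.Proved.gif_decode_3_Lemmas

open X86 X86.User Asan ProgX.Base ProgX.Base.Spec Gif.Spec

/-!
  `gif_decode.3` (0x10aedd … 0x10af77 and 0x10b027 … 0x10b03a, 41 instructions; gif_driver.c:203-218): behind a successful DGifOpen.
  `rbp = gif`; `DGifSlurp(gif)` (its `Env` from `Open`: `HeapPre.at_call`, `gif_decode.ctx`, `GifOK` through the pushed return address);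
  the checked stores `report->slurp_result`, `report->exit_code` (either arm); four checked loads inside gif, each stored (checked)
  into the report. Two private cuts: DGifSlurp's return address 0x10aee8 (`ret15`, assertion `Held ret15` for the heap and the forest
  of the post) and the call of the first load check 0x10af14 (`chk16`, `gd3_AtChk16`), where the two arms meet. Three walks
  (Lemmas.lean), chained here.
-/

/-- Segment 3 of `gif_decode` takes `AfterOpen` at 0x10aedd to `Held` at 0x10af77, for the heap and the forest DGifSlurp returned. -/
theorem Gif.Spec.Proved.gif_decode_3_ok : Gif.Spec.gif_decode_3.Statement := by
  intro Lay hLay μ hμ u₀ hcode h_DGifSlurp h_asan_store4_noabort h_asan_load4_noabort H rest frames Hc Fc e ret v hat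
  -- DGifSlurp's contract for the present heap and forest, the frame list of the body (the own frame in front), THE READER OF THIS FRAME
  have hslurp := h_DGifSlurp Hc rest (gif_decode.framesIn frames e) Fc (gif_decode.reader e)
  -- 0x10aedd … the call … 0x10aee8 (ret15)
  refine (Gif.Spec.gif_decode_3.gd3_seg_call Lay hLay μ hμ u₀ hcode H rest frames Hc Fc e ret hslurp v hat).trans ?_
  intro v1 hv1
  obtain ⟨H', F', hheld1⟩ := hv1
  -- 0x10aee8 … either arm of `if (slurp_result == GIF_OK)` … 0x10af14 (chk16)
  refine (Gif.Spec.gif_decode_3.gd3_seg_result Lay hLay μ hμ u₀ hcode H rest frames H' F' e ret h_asan_store4_noabort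
    v1 hheld1).trans ?_
  intro v2 hv2
  -- 0x10af14 … the four fields of gif into the report … 0x10af77
  refine (Gif.Spec.gif_decode_3.gd3_seg_fields Lay hLay μ hμ u₀ hcode H rest frames H' F' e ret h_asan_store4_noabort
    h_asan_load4_noabort v2 hv2).trans ?_
  intro v3 hv3
  exact ReachVia.done ⟨H', F', hv3⟩
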